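-- pv_equiv track=rewrite | github.com/HoI4-LOTRMod-Team/HoI4-LotrMod | tools/misc/pdx_parser.py | skip_until_brace_closed
-- ===== SOURCE A (Python) =====
-- def skip_until_brace_closed(s, i):
--     j = i
--     c = 0
--     while i < len(s):
--         if s[i] == "{": c += 1
--         if s[i] == "}":
--             c -= 1
--             if c == 0:
--                 i += 1
--                 break
--         i += 1
--     return (s[j:i], i)
-- ===== SOURCE B (Python) =====
-- def skip_until_brace_closed(s, i):
--     # Jump between brace positions with str.find instead of scanning per character.
--     j = i
--     c = 0
--     while True:
--         a = s.find("{", i)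
--         b = s.find("}", i)
--         if a == -1 and b == -1:
--             i = max(i, len(s))
--             break
--         if b == -1 or (a != -1 and a < b):
--             c += 1
--             i = a + 1
--         else:
--             c -= 1
--             i = b + 1
--             if c == 0:
--                 break
--     return (s[j:i], i)
-- ===== Notes on version B (the rewrite author's own statement) =====
-- stated objective: faster
-- what changed: Replaces the per-character while loop with a cursor that jumps directly between brace positions found by str.find, updating the depth counter only at braces.
-- outside the precondition, e.g. on skip_until_brace_closed('{}', -2): A returns ('', 0), B returns ('{}', 2)
import Mathlib
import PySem

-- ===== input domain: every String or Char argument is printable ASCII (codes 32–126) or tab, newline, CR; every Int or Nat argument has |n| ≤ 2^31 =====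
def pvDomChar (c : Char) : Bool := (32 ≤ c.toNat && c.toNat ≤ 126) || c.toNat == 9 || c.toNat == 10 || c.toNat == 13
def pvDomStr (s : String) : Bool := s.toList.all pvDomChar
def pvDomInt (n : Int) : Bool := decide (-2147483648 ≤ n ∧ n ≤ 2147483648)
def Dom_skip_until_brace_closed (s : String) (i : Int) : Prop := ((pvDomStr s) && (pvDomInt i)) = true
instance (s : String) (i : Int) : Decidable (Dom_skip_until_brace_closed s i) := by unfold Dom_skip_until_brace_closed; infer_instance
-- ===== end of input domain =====

-- B replaces A's per-character depth-counting scan by a cursor that jumps between brace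
-- positions located with str.find (objective: idiomatic). Return-value equivalence on i ≥ 0.

-- ===== PORT A =====
-- A's while loop: scan character by character, tracking brace depth c.  The loop runs at
-- most len(s) - i ≤ len(s) times, so fuel len(s) + 1 is never exhausted; Python raises
-- IndexError at s[i] for i < -len(s) (pyGet? = none): the port returns i there (outside Pre_).
def pvSkipALoop (cs : List Char) : Nat → Int → Int → Int
  | 0, i, _ => i
  | fuel + 1, i, c =>
    if i < (cs.length : Int) then
      match PySem.List.pyGet? cs i with
      | none => i   -- s[i] raises IndexError in Python; outside Pre_
      | some ch =>
        let c' := if ch = '{' then c + 1 else c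
        if ch = '}' then
          if c' - 1 = 0 then i + 1 else pvSkipALoop cs fuel (i + 1) (c' - 1)
        else pvSkipALoop cs fuel (i + 1) c'
    else i

def skip_until_brace_closed (s : String) (i : Int) : String × Int :=
  let i' := pvSkipALoop s.toList (s.toList.length + 1) i 0
  (PySem.Str.slice s (some i) (some i'), i')

-- ===== PORT B =====
-- B's while-True loop: jump to the next '{' / '}' via find.  Each iteration either stops or
-- moves the cursor past a fresh brace position, so fuel len(s) + 1 is never exhausted on i ≥ 0.
def pvSkipBLoop (cs : List Char) : Nat → Int → Int → Int
  | 0, i, _ => i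
  | fuel + 1, i, c =>
    let a := PySem.Chars.findFrom cs ['{'] i none
    let b := PySem.Chars.findFrom cs ['}'] i none
    if a = -1 ∧ b = -1 then max i (cs.length : Int)
    else if b = -1 ∨ (¬a = -1 ∧ a < b) then pvSkipBLoop cs fuel (a + 1) (c + 1)
    else if c - 1 = 0 then b + 1
    else pvSkipBLoop cs fuel (b + 1) (c - 1)

def skip_until_brace_closed_alt (s : String) (i : Int) : String × Int :=
  let i' := pvSkipBLoop s.toList (s.toList.length + 1) i 0
  (PySem.Str.slice s (some i) (some i'), i')

-- ===== PRECONDITION & SPEC =====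
-- Pre_ excludes negative i: for i < -len(s) Python A raises IndexError, and for
-- -len(s) ≤ i < 0 A's value comes from negative-index wraparound while str.find clamps a
-- negative start — an accidental corner of both implementations that no caller specifies.
def Pre_skip_until_brace_closed (s : String) (i : Int) : Prop := 0 ≤ i
instance (s : String) (i : Int) : Decidable (Pre_skip_until_brace_closed s i) := by
  unfold Pre_skip_until_brace_closed; infer_instance

def pvWitness_skip_until_brace_closed : String × Int := ("a { b { } } c", 2)

def Spec_skip_until_brace_closed (s : String) (i : Int) (out : String × Int) : Prop :=
  out = skip_until_brace_closed_alt s i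
instance (s : String) (i : Int) (out : String × Int) : Decidable (Spec_skip_until_brace_closed s i out) := by
  unfold Spec_skip_until_brace_closed; infer_instance

-- ===== CLAIM (what is proved, stated in full; the proofs are below) =====
def Claim_equal_skip_until_brace_closed : Prop :=
  ∀ (s : String) (i : Int), Dom_skip_until_brace_closed s i →
    Pre_skip_until_brace_closed s i →
    Spec_skip_until_brace_closed s i (skip_until_brace_closed s i)

-- ===== LEMMAS AND PROOFS =====

theorem pvGo_bounds (sub l : List Char) (k : Nat) (hsub : sub ≠ []) :
    PySem.Chars.find.go sub l k = -1 ∨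
      ((k : Int) ≤ PySem.Chars.find.go sub l k ∧
        PySem.Chars.find.go sub l k < (k : Int) + l.length) := by
  induction l generalizing k with
  | nil =>
    left; simp [PySem.Chars.find.go, hsub]
  | cons h t ih =>
    rw [PySem.Chars.find.go]
    by_cases hp : sub.isPrefixOf (h :: t) = true
    · rw [if_pos hp]
      right
      refine ⟨le_refl _, ?_⟩
      simp only [List.length_cons]
      push_cast
      omega
    · rw [if_neg hp]
      rcases ih (k + 1) with h1 | h1
      · left; exact h1
      · right
        push_cast at h1 ⊢
        refine ⟨by omega, ?_⟩
        simp only [List.length_cons]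
        push_cast
        omega

theorem pvFind_bounds (l sub : List Char) (hsub : sub ≠ []) :
    PySem.Chars.find l sub = -1 ∨
      (0 ≤ PySem.Chars.find l sub ∧ PySem.Chars.find l sub < (l.length : Int)) := by
  have h := pvGo_bounds sub l 0 hsub
  rw [PySem.Chars.find]
  rcases h with h | h
  · left; exact h
  · right; push_cast at h; omega

theorem pvFindFrom_bounds (cs sub : List Char) (i : Int) (hsub : sub ≠ [])
    (h : PySem.Chars.findFrom cs sub i none ≠ -1) :
    i ≤ PySem.Chars.findFrom cs sub i none ∧ 0 ≤ PySem.Chars.findFrom cs sub i none ∧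
      PySem.Chars.findFrom cs sub i none < (cs.length : Int) := by
  rw [PySem.Chars.findFrom] at h ⊢
  simp only at h ⊢
  split_ifs at h ⊢ with h1 h2 h3 h4 h5 h6
  all_goals try exact absurd rfl h
  all_goals
    have hg := pvFind_bounds (List.drop (Int.toNat 0) (List.take ((cs.length : Int)).toNat cs)) sub hsub
    have hg2 := pvFind_bounds (List.drop (i + (cs.length : Int)).toNat (List.take ((cs.length : Int)).toNat cs)) sub hsub
    have hg3 := pvFind_bounds (List.drop i.toNat (List.take ((cs.length : Int)).toNat cs)) sub hsub
    simp only [List.length_drop, List.length_take] at hg hg2 hg3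
    rcases hg with hg | hg <;> rcases hg2 with hg2 | hg2 <;> rcases hg3 with hg3 | hg3 <;> omega

theorem pvSingleton_prefix (ch : Char) (l : List Char) : [ch] <+: l ↔ l.head? = some ch := by
  cases l with
  | nil => simp
  | cons x xs => simp [List.cons_prefix_cons, eq_comm]

-- findFrom from a valid nat position, successful: position, character, minimality.
theorem pvFound (cs : List Char) (ch : Char) (k : Nat) (hk : k ≤ cs.length)
    (h : PySem.Chars.findFrom cs [ch] (k : Int) none ≠ -1) :
    ∃ r : Nat, PySem.Chars.findFrom cs [ch] (k : Int) none = (r : Int) ∧ k ≤ r ∧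
      cs[r]? = some ch ∧ ∀ m, k ≤ m → m < r → cs[m]? ≠ some ch := by
  obtain ⟨h1, h2, h3⟩ := PySem.Chars.findFrom_natCast_spec cs [ch] k hk h
  refine ⟨(PySem.Chars.findFrom cs [ch] (k : Int) none).toNat, by omega, by omega, ?_, ?_⟩
  · have := (pvSingleton_prefix ch _).mp h2
    rwa [List.head?_drop] at this
  · intro m hm1 hm2
    have := h3 m hm1 hm2
    rw [pvSingleton_prefix, List.head?_drop] at this
    exact this

-- findFrom from a valid nat position, failed: the character does not occur at or after k.
theorem pvNone (cs : List Char) (ch : Char) (k : Nat) (hk : k ≤ cs.length)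
    (h : PySem.Chars.findFrom cs [ch] (k : Int) none = -1) :
    ∀ m, k ≤ m → cs[m]? ≠ some ch := by
  have hinf := (PySem.Chars.findFrom_natCast_eq_neg_one_iff cs [ch] k hk).mp h
  rw [List.singleton_infix_iff] at hinf
  intro m hm hsome
  apply hinf
  have hd : (List.drop k cs)[m - k]? = some ch := by
    rw [List.getElem?_drop]
    have : k + (m - k) = m := by omega
    rw [this]; exact hsome
  obtain ⟨hlt, heq⟩ := List.getElem?_eq_some_iff.mp hd
  rw [List.mem_iff_getElem]
  exact ⟨m - k, hlt, heq⟩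

-- findFrom from a position at or past the end is -1.
theorem pvFindPastEnd (cs : List Char) (ch : Char) (i : Int)
    (h : (cs.length : Int) ≤ i) : PySem.Chars.findFrom cs [ch] i none = -1 := by
  by_contra hc
  have := pvFindFrom_bounds cs [ch] i (by simp) hc
  omega

-- A's loop does nothing once i ≥ len, whatever the fuel.
theorem pvALoop_base (cs : List Char) (f : Nat) (i c : Int) (h : (cs.length : Int) ≤ i) :
    pvSkipALoop cs f i c = i := by
  cases f with
  | zero => rfl
  | succ f => rw [pvSkipALoop]; simp [show ¬ i < (cs.length : Int) by omega]

-- B's loop from a position at or past the end returns i, whatever the fuel.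
theorem pvBLoop_base (cs : List Char) (f : Nat) (i c : Int) (h : (cs.length : Int) ≤ i) :
    pvSkipBLoop cs f i c = i := by
  cases f with
  | zero => rfl
  | succ f =>
    rw [pvSkipBLoop]
    simp [pvFindPastEnd cs '{' i h, pvFindPastEnd cs '}' i h]
    omega

-- One step of A's loop at a position holding '{': depth increases.
theorem pvALoop_step_open (cs : List Char) (f : Nat) (p : Nat) (c : Int)
    (hp : cs[p]? = some '{') :
    pvSkipALoop cs (f + 1) (p : Int) c = pvSkipALoop cs f ((p : Int) + 1) (c + 1) := by
  have hplt : p < cs.length := by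
    by_contra hc
    rw [List.getElem?_eq_none (by omega)] at hp; simp at hp
  rw [pvSkipALoop]
  have hch : PySem.List.pyGet? cs (p : Int) = some '{' := by
    simp [PySem.List.pyGet?_natCast, hp]
  simp only [show (p : Int) < (cs.length : Int) by exact_mod_cast hplt, if_pos, hch]
  simp

-- One step of A's loop at a position holding '}': depth decreases, the loop may end.
theorem pvALoop_step_close (cs : List Char) (f : Nat) (p : Nat) (c : Int)
    (hp : cs[p]? = some '}') :
    pvSkipALoop cs (f + 1) (p : Int) c =
      if c - 1 = 0 then (p : Int) + 1 else pvSkipALoop cs f ((p : Int) + 1) (c - 1) := by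
  have hplt : p < cs.length := by
    by_contra hc
    rw [List.getElem?_eq_none (by omega)] at hp; simp at hp
  rw [pvSkipALoop]
  have hch : PySem.List.pyGet? cs (p : Int) = some '}' := by
    simp [PySem.List.pyGet?_natCast, hp]
  simp only [show (p : Int) < (cs.length : Int) by exact_mod_cast hplt, if_pos, hch]
  simp

-- Fast-forward: A's scan crosses a brace-free gap without changing c, one fuel per char.
theorem pvALoop_ff (cs : List Char) : ∀ (d k : Nat) (f : Nat) (c : Int), k + d ≤ cs.length →
    (∀ m, k ≤ m → m < k + d → cs[m]? ≠ some '{' ∧ cs[m]? ≠ some '}') →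
    pvSkipALoop cs (f + d) (k : Int) c = pvSkipALoop cs f ((k + d : Nat) : Int) c := by
  intro d
  induction d with
  | zero => intro k f c _ _; rfl
  | succ d ih =>
    intro k f c hlen hgap
    have hklt : k < cs.length := by omega
    have hch : PySem.List.pyGet? cs (k : Int) = some cs[k] := by
      simp [PySem.List.pyGet?_natCast, List.getElem?_eq_getElem hklt]
    have hnb := hgap k (le_refl k) (by omega)
    rw [List.getElem?_eq_getElem hklt] at hnb
    have h1 : ¬ cs[k] = '{' := by intro hx; exact hnb.1 (by rw [hx])
    have h2 : ¬ cs[k] = '}' := by intro hx; exact hnb.2 (by rw [hx])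
    have hshape : f + (d + 1) = (f + d) + 1 := by omega
    rw [hshape, pvSkipALoop]
    simp only [show (k : Int) < (cs.length : Int) by exact_mod_cast hklt, if_pos, hch, h1, h2,
      if_false]
    have hcast : (k : Int) + 1 = ((k + 1 : Nat) : Int) := by push_cast; ring
    rw [hcast, ih (k + 1) f c (by omega) (by intro m hm1 hm2; exact hgap m (by omega) (by omega))]
    congr 1
    push_cast; ring

-- Main loop equivalence on nat positions: with enough fuel on both sides the two loops agree.
theorem pvLoop_eq (cs : List Char) : ∀ (n k : Nat) (c : Int) (fa fb : Nat),
    cs.length ≤ k + n → cs.length < k + fa → cs.length < k + fb →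
    pvSkipBLoop cs fb (k : Int) c = pvSkipALoop cs fa (k : Int) c := by
  intro n
  induction n with
  | zero =>
    intro k c fa fb hn _ _
    rw [pvBLoop_base cs fb _ c (by exact_mod_cast hn), pvALoop_base cs fa _ c (by exact_mod_cast hn)]
  | succ n ih =>
    intro k c fa fb hn hfa hfb
    by_cases hk : cs.length ≤ k
    · rw [pvBLoop_base cs fb _ c (by exact_mod_cast hk), pvALoop_base cs fa _ c (by exact_mod_cast hk)]
    · push_neg at hk
      have hkle : k ≤ cs.length := by omega
      obtain ⟨fb', rfl⟩ : ∃ fb', fb = fb' + 1 := ⟨fb - 1, by omega⟩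
      rw [pvSkipBLoop]
      by_cases ha : PySem.Chars.findFrom cs ['{'] (k : Int) none = -1 <;>
        by_cases hb : PySem.Chars.findFrom cs ['}'] (k : Int) none = -1
      · -- no braces at ≥ k: B gives len, A scans to the end
        simp only [ha, hb, and_self, if_true]
        have hgap : ∀ m, k ≤ m → m < k + (cs.length - k) → cs[m]? ≠ some '{' ∧ cs[m]? ≠ some '}' :=
          fun m hm _ => ⟨pvNone cs '{' k hkle ha m hm, pvNone cs '}' k hkle hb m hm⟩
        obtain ⟨fa', rfl⟩ : ∃ fa', fa = fa' + (cs.length - k) :=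
          ⟨fa - (cs.length - k), by omega⟩
        rw [pvALoop_ff cs (cs.length - k) k fa' c (by omega) hgap]
        have : ((k + (cs.length - k) : Nat) : Int) = (cs.length : Int) := by push_cast; omega
        rw [this, pvALoop_base cs fa' _ c (le_refl _)]
        omega
      · -- only '}' occurs at ≥ k: the '}' branch
        obtain ⟨rb, hbeq, hkb, hchb, hminb⟩ := pvFound cs '}' k hkle hb
        simp only [ha, hb, and_false, if_false, false_or, not_true_eq_false, false_and, if_false]
        have hrblt : rb < cs.length := by
          by_contra hc
          rw [List.getElem?_eq_none (by omega)] at hchb; simp at hchb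
        have hgap : ∀ m, k ≤ m → m < k + (rb - k) → cs[m]? ≠ some '{' ∧ cs[m]? ≠ some '}' :=
          fun m hm hm2 => ⟨pvNone cs '{' k hkle ha m hm, hminb m hm (by omega)⟩
        obtain ⟨fa', rfl⟩ : ∃ fa', fa = (fa' + 1) + (rb - k) :=
          ⟨fa - (rb - k) - 1, by omega⟩
        rw [pvALoop_ff cs (rb - k) k (fa' + 1) c (by omega) hgap]
        have hcast : ((k + (rb - k) : Nat) : Int) = (rb : Int) := by push_cast; omega
        rw [hcast, pvALoop_step_close cs fa' rb c hchb, hbeq]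
        by_cases hc0 : c - 1 = 0
        · simp [hc0]
        · simp only [hc0, if_false]
          have : (rb : Int) + 1 = ((rb + 1 : Nat) : Int) := by push_cast; ring
          rw [this, ih (rb + 1) (c - 1) fa' fb' (by omega) (by omega) (by omega)]
      · -- only '{' occurs at ≥ k: the '{' branch
        obtain ⟨ra, haeq, hka, hcha, hmina⟩ := pvFound cs '{' k hkle ha
        simp only [ha, hb, false_and, if_false, true_or, if_true]
        have hralt : ra < cs.length := by
          by_contra hc
          rw [List.getElem?_eq_none (by omega)] at hcha; simp at hcha
        have hgap : ∀ m, k ≤ m → m < k + (ra - k) → cs[m]? ≠ some '{' ∧ cs[m]? ≠ some '}' :=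
          fun m hm hm2 => ⟨hmina m hm (by omega), pvNone cs '}' k hkle hb m hm⟩
        obtain ⟨fa', rfl⟩ : ∃ fa', fa = (fa' + 1) + (ra - k) :=
          ⟨fa - (ra - k) - 1, by omega⟩
        rw [pvALoop_ff cs (ra - k) k (fa' + 1) c (by omega) hgap]
        have hcast : ((k + (ra - k) : Nat) : Int) = (ra : Int) := by push_cast; omega
        rw [hcast, pvALoop_step_open cs fa' ra c hcha, haeq]
        have : (ra : Int) + 1 = ((ra + 1 : Nat) : Int) := by push_cast; ring
        rw [this, ih (ra + 1) (c + 1) fa' fb' (by omega) (by omega) (by omega)]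
      · -- both braces occur at ≥ k: compare their positions
        obtain ⟨ra, haeq, hka, hcha, hmina⟩ := pvFound cs '{' k hkle ha
        obtain ⟨rb, hbeq, hkb, hchb, hminb⟩ := pvFound cs '}' k hkle hb
        have hralt : ra < cs.length := by
          by_contra hc
          rw [List.getElem?_eq_none (by omega)] at hcha; simp at hcha
        have hrblt : rb < cs.length := by
          by_contra hc
          rw [List.getElem?_eq_none (by omega)] at hchb; simp at hchb
        have hne : ra ≠ rb := by
          intro hx; rw [hx, hchb] at hcha; simp at hcha
        by_cases hab : ra < rb
        · -- '{' comes first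
          simp only [haeq, hbeq]
          have hcond : ((rb : Int) = -1 ∨ (¬(ra : Int) = -1 ∧ (ra : Int) < (rb : Int))) := by
            right; exact ⟨by omega, by exact_mod_cast hab⟩
          rw [if_neg (by omega), if_pos hcond]
          have hgap : ∀ m, k ≤ m → m < k + (ra - k) → cs[m]? ≠ some '{' ∧ cs[m]? ≠ some '}' :=
            fun m hm hm2 => ⟨hmina m hm (by omega), hminb m hm (by omega)⟩
          obtain ⟨fa', rfl⟩ : ∃ fa', fa = (fa' + 1) + (ra - k) :=
            ⟨fa - (ra - k) - 1, by omega⟩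
          rw [pvALoop_ff cs (ra - k) k (fa' + 1) c (by omega) hgap]
          have hcast : ((k + (ra - k) : Nat) : Int) = (ra : Int) := by push_cast; omega
          rw [hcast, pvALoop_step_open cs fa' ra c hcha]
          have : (ra : Int) + 1 = ((ra + 1 : Nat) : Int) := by push_cast; ring
          rw [this, ih (ra + 1) (c + 1) fa' fb' (by omega) (by omega) (by omega)]
        · -- '}' comes first
          have hba : rb < ra := by omega
          simp only [haeq, hbeq]
          rw [if_neg (by omega), if_neg (by
            intro hx
            rcases hx with hx | ⟨_, hx⟩
            · omega
            · have : ra < rb := by exact_mod_cast hx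
              omega)]
          have hgap : ∀ m, k ≤ m → m < k + (rb - k) → cs[m]? ≠ some '{' ∧ cs[m]? ≠ some '}' :=
            fun m hm hm2 => ⟨hmina m hm (by omega), hminb m hm (by omega)⟩
          obtain ⟨fa', rfl⟩ : ∃ fa', fa = (fa' + 1) + (rb - k) :=
            ⟨fa - (rb - k) - 1, by omega⟩
          rw [pvALoop_ff cs (rb - k) k (fa' + 1) c (by omega) hgap]
          have hcast : ((k + (rb - k) : Nat) : Int) = (rb : Int) := by push_cast; omega
          rw [hcast, pvALoop_step_close cs fa' rb c hchb]
          by_cases hc0 : c - 1 = 0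
          · simp [hc0]
          · simp only [hc0, if_false]
            have : (rb : Int) + 1 = ((rb + 1 : Nat) : Int) := by push_cast; ring
            rw [this, ih (rb + 1) (c - 1) fa' fb' (by omega) (by omega) (by omega)]

-- ===== VERDICT (by name: the statement is the Claim_ definition above) =====
theorem skip_until_brace_closed_spec : Claim_equal_skip_until_brace_closed := by
  intro s i _ hpre
  have hp0 : 0 ≤ i := hpre
  unfold Spec_skip_until_brace_closed skip_until_brace_closed skip_until_brace_closed_alt
  have hi : i = ((i.toNat : Nat) : Int) := by omega
  have hloops : pvSkipBLoop s.toList (s.toList.length + 1) i 0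
      = pvSkipALoop s.toList (s.toList.length + 1) i 0 := by
    by_cases hbig : s.toList.length < i.toNat
    · rw [pvBLoop_base s.toList _ i 0 (by omega), pvALoop_base s.toList _ i 0 (by omega)]
    · rw [hi]
      exact pvLoop_eq s.toList s.toList.length i.toNat 0 _ _ (by omega) (by omega) (by omega)
  simp only [hloops]
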